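-- pv_equiv track=rewrite | github.com/981377660LMT/algorithm-study | 20_杂题/atc競プロ/AtCoder Beginner Contest/194/B - Job Assignment.py | jobAssignment1
-- ===== SOURCE A (Python) =====
-- from typing import List, Tuple
--
-- INF = int(4e18)
--
-- def jobAssignment1(costs: List[Tuple[int, int]]) -> int:
--     cost1, cost2 = [list(row) for row in zip(*costs)]
--     i, j = cost1.index(min(cost1)), cost2.index(min(cost2))
--     if i != j:  # 两个最小值不在同一个位置
--         return max(cost1[i], cost2[j])
--     min1, min2 = cost1[i], cost2[j]
--     cost1[i], cost2[j] = INF, INF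
--     return min(min1 + min2, max(min1, min(cost2)), max(min2, min(cost1)))
-- ===== SOURCE B (Python) =====
-- from typing import List, Tuple
--
-- INF = int(4e18)
--
-- def jobAssignment1(costs: List[Tuple[int, int]]) -> int:
--     # One pass tracking, for each column, the minimum, its first index, and the
--     # minimum over the other positions; then combine the three candidates.
--     m1, i1, s1 = INF, -1, INF
--     m2, j2, s2 = INF, -1, INF
--     for k, (a, b) in enumerate(costs):
--         if a < m1:
--             m1, i1, s1 = a, k, m1
--         elif a < s1:
--             s1 = a
--         if b < m2:
--             m2, j2, s2 = b, k, m2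
--         elif b < s2:
--             s2 = b
--     if i1 != j2:
--         return max(m1, m2)
--     return min(m1 + m2, max(m1, s2), max(m2, s1))
-- ===== Notes on version B (the rewrite author's own statement) =====
-- stated objective: alternative
-- what changed: Replaces A's four separate library scans (two min(), two .index()/mutate-and-re-min passes over unzipped columns) by a single fold over the rows that tracks, per column, the running minimum, its first index, and the minimum over the other positions, then combines the same three candidates.
import Mathlib
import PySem

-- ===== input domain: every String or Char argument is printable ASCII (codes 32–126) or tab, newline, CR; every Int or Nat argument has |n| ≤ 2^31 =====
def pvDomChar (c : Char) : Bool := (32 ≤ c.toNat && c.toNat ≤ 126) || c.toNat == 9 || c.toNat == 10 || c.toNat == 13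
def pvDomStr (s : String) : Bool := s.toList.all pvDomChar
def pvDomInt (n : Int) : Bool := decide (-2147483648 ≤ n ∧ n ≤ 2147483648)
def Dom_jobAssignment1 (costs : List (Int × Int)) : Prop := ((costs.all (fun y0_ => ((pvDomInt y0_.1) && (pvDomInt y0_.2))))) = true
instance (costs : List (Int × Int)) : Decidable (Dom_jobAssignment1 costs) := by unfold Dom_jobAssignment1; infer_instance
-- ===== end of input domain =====

-- B replaces A's four library scans (min/index/mutate/re-min on unzipped columns) by one
-- fold over the rows tracking (min, first argmin, min-of-the-rest) per column: an
-- alternative single-pass decomposition, proved to return the same value on nonempty input.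


-- INF = int(4e18)
def pvINF : Int := 4000000000000000000

-- ===== PORT A =====
-- cost1, cost2 = [list(row) for row in zip(*costs)]; i = cost1.index(min(cost1)); …
-- min() raises ValueError on an empty list (costs = []); that input is outside Pre_.
def jobAssignment1 (costs : List (Int × Int)) : Int :=
  let cost1 := costs.map Prod.fst
  let cost2 := costs.map Prod.snd
  match PySem.List.min? cost1 (fun x => x), PySem.List.min? cost2 (fun x => x) with
  | some mn1, some mn2 =>
    match PySem.List.index? cost1 mn1, PySem.List.index? cost2 mn2 with
    | some i, some j =>
      if i ≠ j then
        max (cost1.getD i 0) (cost2.getD j 0)   -- indices from .index are valid: getD is exact here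
      else
        let min1 := cost1.getD i 0
        let min2 := cost2.getD j 0
        let cost1' := cost1.set i pvINF         -- cost1[i] = INF
        let cost2' := cost2.set j pvINF         -- cost2[j] = INF
        min (min1 + min2)
          (min (max min1 ((PySem.List.min? cost2' (fun x => x)).getD 0))
               (max min2 ((PySem.List.min? cost1' (fun x => x)).getD 0)))
    | _, _ => 0   -- unreachable: min(cost) is a member of cost
  | _, _ => 0     -- empty costs: Python raises ValueError (excluded by Pre_)

-- ===== PORT B =====
-- one loop body: update (min, first argmin, min-of-the-rest) for each of the two columns
def pvStepB (st : Int × Int × Int × Int × Int × Int) (p : Int × (Int × Int)) :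
    Int × Int × Int × Int × Int × Int :=
  match st, p with
  | (m1, i1, s1, m2, j2, s2), (k, (a, b)) =>
    let t1 := if a < m1 then (a, k, m1) else if a < s1 then (m1, i1, a) else (m1, i1, s1)
    let t2 := if b < m2 then (b, k, m2) else if b < s2 then (m2, j2, b) else (m2, j2, s2)
    (t1.1, t1.2.1, t1.2.2, t2.1, t2.2.1, t2.2.2)

def jobAssignment1_alt (costs : List (Int × Int)) : Int :=
  match (PySem.List.enumerate costs 0).foldl pvStepB (pvINF, -1, pvINF, pvINF, -1, pvINF) with
  | (m1, i1, s1, m2, j2, s2) =>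
    if i1 ≠ j2 then max m1 m2
    else min (m1 + m2) (min (max m1 s2) (max m2 s1))

-- ===== PRECONDITION & SPEC =====
-- Pre_ excludes only empty costs, on which A's `zip(*costs)` unpacking raises ValueError.
def Pre_jobAssignment1 (costs : List (Int × Int)) : Prop := costs ≠ []
instance (costs : List (Int × Int)) : Decidable (Pre_jobAssignment1 costs) := by unfold Pre_jobAssignment1; infer_instance
def pvWitness_jobAssignment1 : (List (Int × Int)) := [(3, 5), (2, 7)]
def Spec_jobAssignment1 (costs : List (Int × Int)) (out : Int) : Prop := out = jobAssignment1_alt costs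
instance (costs : List (Int × Int)) (out : Int) : Decidable (Spec_jobAssignment1 costs out) := by unfold Spec_jobAssignment1; infer_instance

-- ===== CLAIM (what is proved, stated in full; the proofs are below) =====
def Claim_equal_jobAssignment1 : Prop := ∀ (costs : List (Int × Int)), Dom_jobAssignment1 costs → Pre_jobAssignment1 costs → Spec_jobAssignment1 costs (jobAssignment1 costs)

-- ===== LEMMAS AND PROOFS =====

def pvTrk (st : Int × Int × Int) (p : Int × Int) : Int × Int × Int :=
  match st, p with
  | (m, i, s), (k, x) => if x < m then (x, k, m) else if x < s then (m, i, x) else (m, i, s)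

theorem pvMin?_append (l : List Int) (x m : Int) (hm : PySem.List.min? l (fun y => y) = some m) :
    PySem.List.min? (l ++ [x]) (fun y => y) = some (min m x) := by
  cases l with
  | nil => have := PySem.List.min?_mem hm; simp at this
  | cons y t =>
    rw [PySem.List.min?_id_cons] at hm
    injection hm with hm
    rw [List.cons_append, PySem.List.min?_id_cons, List.foldl_append]
    simp [hm]

theorem pvTrk_spec (l : List Int) (hne : l ≠ []) (hb : ∀ x ∈ l, x < pvINF) :
    ∃ (m : Int) (i : Nat) (s : Int),
      (PySem.List.enumerate l 0).foldl pvTrk (pvINF, -1, pvINF) = (m, (i : Int), s) ∧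
      PySem.List.min? l (fun y => y) = some m ∧
      PySem.List.index? l m = some i ∧
      PySem.List.min? (l.set i pvINF) (fun y => y) = some s := by
  induction l using List.reverseRecOn with
  | nil => exact absurd rfl hne
  | append_singleton l x ih =>
    have hx : x < pvINF := hb x (by simp)
    have henum : PySem.List.enumerate (l ++ [x]) 0
        = PySem.List.enumerate l 0 ++ [((l.length : Int), x)] := by
      rw [PySem.List.enumerate_append]
      simp [PySem.List.enumerate_cons, PySem.List.enumerate_nil]
    rcases eq_or_ne l [] with hl | hl
    · subst hl
      refine ⟨x, 0, pvINF, ?_, ?_, ?_, ?_⟩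
      · simp [PySem.List.enumerate_cons, PySem.List.enumerate_nil, pvTrk, hx]
      · simp [PySem.List.min?_id_cons]
      · simp
      · simp [PySem.List.min?_id_cons]
    · obtain ⟨m, i, s, hfold, hmin, hidx, hset⟩ := ih hl (fun y hy => hb y (by simp [hy]))
      obtain ⟨hklt, hget, _⟩ := PySem.List.getElem_of_index?_eq_some hidx
      have hmem : m ∈ l := PySem.List.min?_mem hmin
      rw [henum, List.foldl_append, hfold]
      simp only [List.foldl_cons, List.foldl_nil]
      by_cases h1 : x < m
      · have hnotmem : x ∉ l := fun hc => absurd (PySem.List.min?_isMin hmin x hc) (by omega)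
        refine ⟨x, l.length, m, ?_, ?_, ?_, ?_⟩
        · simp [pvTrk, h1]
        · rw [pvMin?_append l x m hmin]; congr 1; omega
        · exact PySem.List.index?_append_singleton_self l x hnotmem
        · rw [List.set_append]
          simp only [lt_irrefl, if_false, Nat.sub_self, List.set_cons_zero]
          rw [pvMin?_append l pvINF m hmin]
          congr 1
          have : m < pvINF := hb m (by simp [hmem])
          omega
      · have hle : m ≤ x := by omega
        have hsetapp : (l ++ [x]).set i pvINF = l.set i pvINF ++ [x] := by
          rw [List.set_append, if_pos hklt]
        by_cases h2 : x < s
        · refine ⟨m, i, x, ?_, ?_, ?_, ?_⟩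
          · simp [pvTrk, h1, h2]
          · rw [pvMin?_append l x m hmin]; congr 1; omega
          · rw [PySem.List.index?_append_of_mem [x] hmem]; exact hidx
          · rw [hsetapp, pvMin?_append _ x s hset]; congr 1; omega
        · refine ⟨m, i, s, ?_, ?_, ?_, ?_⟩
          · simp [pvTrk, h1, h2]
          · rw [pvMin?_append l x m hmin]; congr 1; omega
          · rw [PySem.List.index?_append_of_mem [x] hmem]; exact hidx
          · rw [hsetapp, pvMin?_append _ x s hset]; congr 1; omega

theorem pvEnum_map {α β : Type} (f : α → β) : ∀ (xs : List α) (s : Int),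
    (PySem.List.enumerate xs s).map (fun p => (p.1, f p.2)) = PySem.List.enumerate (xs.map f) s := by
  intro xs
  induction xs with
  | nil => intro s; simp [PySem.List.enumerate_nil]
  | cons y t ih => intro s; simp [PySem.List.enumerate_cons, ih]

theorem pvFold_proj : ∀ (l : List (Int × (Int × Int))) (st : Int × Int × Int × Int × Int × Int),
    l.foldl pvStepB st =
      (((l.map (fun p => (p.1, p.2.1))).foldl pvTrk (st.1, st.2.1, st.2.2.1)).1,
       ((l.map (fun p => (p.1, p.2.1))).foldl pvTrk (st.1, st.2.1, st.2.2.1)).2.1,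
       ((l.map (fun p => (p.1, p.2.1))).foldl pvTrk (st.1, st.2.1, st.2.2.1)).2.2,
       ((l.map (fun p => (p.1, p.2.2))).foldl pvTrk (st.2.2.2.1, st.2.2.2.2.1, st.2.2.2.2.2)).1,
       ((l.map (fun p => (p.1, p.2.2))).foldl pvTrk (st.2.2.2.1, st.2.2.2.2.1, st.2.2.2.2.2)).2.1,
       ((l.map (fun p => (p.1, p.2.2))).foldl pvTrk (st.2.2.2.1, st.2.2.2.2.1, st.2.2.2.2.2)).2.2) := by
  intro l
  induction l with
  | nil => intro st; rfl
  | cons p t ih =>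
    intro st
    obtain ⟨m1, i1, s1, m2, j2, s2⟩ := st
    obtain ⟨k, a, b⟩ := p
    simp only [List.foldl_cons, List.map_cons, ih]
    simp only [pvStepB, pvTrk]

theorem main_eq : ∀ (costs : List (Int × Int)), Dom_jobAssignment1 costs → Pre_jobAssignment1 costs → jobAssignment1 costs = jobAssignment1_alt costs := by
  intro costs hd hp
  unfold Pre_jobAssignment1 at hp
  have hdom : ∀ p ∈ costs, -2147483648 ≤ p.1 ∧ p.1 ≤ 2147483648 ∧ -2147483648 ≤ p.2 ∧ p.2 ≤ 2147483648 := by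
    intro p hpmem
    unfold Dom_jobAssignment1 at hd
    rw [List.all_eq_true] at hd
    have := hd p hpmem
    simp [pvDomInt] at this
    omega
  have hb1 : ∀ x ∈ costs.map Prod.fst, x < pvINF := by
    intro x hx
    rw [List.mem_map] at hx
    obtain ⟨p, hpm, rfl⟩ := hx
    have := hdom p hpm
    unfold pvINF
    omega
  have hb2 : ∀ x ∈ costs.map Prod.snd, x < pvINF := by
    intro x hx
    rw [List.mem_map] at hx
    obtain ⟨p, hpm, rfl⟩ := hx
    have := hdom p hpm
    unfold pvINF
    omega
  have hne1 : costs.map Prod.fst ≠ [] := by simpa using hp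
  have hne2 : costs.map Prod.snd ≠ [] := by simpa using hp
  obtain ⟨m1, i1, s1, hf1, hm1, hi1, hs1⟩ := pvTrk_spec _ hne1 hb1
  obtain ⟨m2, j2, s2, hf2, hm2, hi2, hs2⟩ := pvTrk_spec _ hne2 hb2
  obtain ⟨hk1, hg1, -⟩ := PySem.List.getElem_of_index?_eq_some hi1
  obtain ⟨hk2, hg2, -⟩ := PySem.List.getElem_of_index?_eq_some hi2
  have hmap1 : (PySem.List.enumerate costs 0).map (fun p => (p.1, p.2.1))
      = PySem.List.enumerate (costs.map Prod.fst) 0 := pvEnum_map Prod.fst costs 0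
  have hmap2 : (PySem.List.enumerate costs 0).map (fun p => (p.1, p.2.2))
      = PySem.List.enumerate (costs.map Prod.snd) 0 := pvEnum_map Prod.snd costs 0
  have hB : jobAssignment1_alt costs
      = if (i1 : Int) ≠ (j2 : Int) then max m1 m2
        else min (m1 + m2) (min (max m1 s2) (max m2 s1)) := by
    unfold jobAssignment1_alt
    rw [pvFold_proj]
    simp only [hmap1, hmap2, hf1, hf2]
  have hgd1 : (costs.map Prod.fst).getD i1 0 = m1 := by
    rw [List.getD_eq_getElem _ _ hk1, hg1]
  have hgd2 : (costs.map Prod.snd).getD j2 0 = m2 := by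
    rw [List.getD_eq_getElem _ _ hk2, hg2]
  rw [hB]
  simp only [jobAssignment1, hm1, hm2, hi1, hi2, hgd1, hgd2, hs1, hs2, Option.getD_some]
  by_cases hij : i1 = j2
  · simp [hij]
  · simp [hij]

-- ===== VERDICT (by name: the statement is the Claim_ definition above) =====
theorem jobAssignment1_spec : Claim_equal_jobAssignment1 := by
  intro costs hd hp
  unfold Spec_jobAssignment1
  exact main_eq costs hd hp
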